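-- pv_equiv track=rewrite | github.com/Jeffrey04/aoc | 2022/day8/aoc2022-d8-python/src/aoc2022_d8_python/day8.py | tree_count_distance
-- ===== SOURCE A (Python) =====
-- def tree_count_distance(tree_list: list[int], idx: int = -2, result: int = 0) -> int:
--     return (
--         result
--         if idx < len(tree_list) * -1
--         else tree_count_distance(tree_list, idx - 1, result + 1)
--         if tree_list[idx] < tree_list[-1]
--         else (result + 1)
--     )
-- ===== SOURCE B (Python) =====
-- def tree_count_distance(tree_list: list[int], idx: int = -2, result: int = 0) -> int:
--     n = len(tree_list)
--     if idx < -n: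
--         return result
--     last = tree_list[-1]
--     for j in range(idx, -n - 1, -1):
--         if tree_list[j] >= last:
--             return result + (idx - j) + 1
--     return result + (idx + n) + 1
-- ===== Notes on version B (the rewrite author's own statement) =====
-- stated objective: alternative
-- what changed: Replaces the tail recursion that threads an accumulator through every step with a linear search for the first blocking tree (scanning indices idx down to -n) followed by a closed-form distance computation result + (idx - j) + 1.
import Mathlib
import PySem

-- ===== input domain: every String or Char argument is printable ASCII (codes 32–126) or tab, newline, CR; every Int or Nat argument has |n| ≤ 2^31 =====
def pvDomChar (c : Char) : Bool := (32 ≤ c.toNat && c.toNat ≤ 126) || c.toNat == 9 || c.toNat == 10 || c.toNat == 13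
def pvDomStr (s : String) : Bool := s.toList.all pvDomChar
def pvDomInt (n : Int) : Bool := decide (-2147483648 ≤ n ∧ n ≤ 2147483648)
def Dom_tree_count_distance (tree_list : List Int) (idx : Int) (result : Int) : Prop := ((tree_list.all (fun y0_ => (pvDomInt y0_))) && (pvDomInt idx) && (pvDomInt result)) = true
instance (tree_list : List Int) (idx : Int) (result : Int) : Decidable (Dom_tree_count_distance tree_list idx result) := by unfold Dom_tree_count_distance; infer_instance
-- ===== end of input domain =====

-- B replaces A's accumulator-threading tail recursion by a linear search for the first
-- blocking tree followed by a closed-form distance computation (objective: alternative).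

-- ===== PORT A =====
def tree_count_distance (tree_list : List Int) (idx : Int) (result : Int) : Int :=
  if idx < (tree_list.length : Int) * (-1) then result
  else if (PySem.List.pyGet? tree_list idx).getD 0 < (PySem.List.pyGet? tree_list (-1)).getD 0 then
    tree_count_distance tree_list (idx - 1) (result + 1)
  else result + 1
termination_by (idx + tree_list.length + 1).toNat
decreasing_by omega

-- ===== PORT B =====
-- the for-loop of Source B: scan the index list for the first blocker, else fall through
def tcdFind (tree_list : List Int) (last : Int) (idx : Int) (result : Int) : List Int → Int
  | [] => result + (idx + tree_list.length) + 1
  | j :: rest =>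
      if (PySem.List.pyGet? tree_list j).getD 0 ≥ last then result + (idx - j) + 1
      else tcdFind tree_list last idx result rest

def tree_count_distance_alt (tree_list : List Int) (idx : Int) (result : Int) : Int :=
  let n : Int := tree_list.length
  if idx < -n then result
  else
    tcdFind tree_list ((PySem.List.pyGet? tree_list (-1)).getD 0) idx result
      (PySem.List.pyRange idx (-n - 1) (-1))

-- ===== PRECONDITION & SPEC =====
-- Pre_ excludes exactly the inputs on which Python A raises IndexError (tree_list[idx]
-- with idx ≥ len(tree_list)); Python B raises on exactly the same inputs.
def Pre_tree_count_distance (tree_list : List Int) (idx : Int) (result : Int) : Prop :=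
  idx < (tree_list.length : Int)
instance (tree_list : List Int) (idx : Int) (result : Int) : Decidable (Pre_tree_count_distance tree_list idx result) := by unfold Pre_tree_count_distance; infer_instance
def pvWitness_tree_count_distance : List Int × Int × Int := ([3, 1, 2], -2, 0)

def Spec_tree_count_distance (tree_list : List Int) (idx : Int) (result : Int) (out : Int) : Prop := out = tree_count_distance_alt tree_list idx result
instance (tree_list : List Int) (idx : Int) (result : Int) (out : Int) : Decidable (Spec_tree_count_distance tree_list idx result out) := by unfold Spec_tree_count_distance; infer_instance

-- ===== CLAIM (what is proved, stated in full; the proofs are below) =====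
def Claim_equal_tree_count_distance : Prop := ∀ (tree_list : List Int) (idx : Int) (result : Int), Dom_tree_count_distance tree_list idx result → Pre_tree_count_distance tree_list idx result → Spec_tree_count_distance tree_list idx result (tree_count_distance tree_list idx result)

-- ===== LEMMAS AND PROOFS =====

-- tcdFind only depends on idx and result through their sum
theorem tcdFind_shift (tree_list : List Int) (last idx result : Int) (l : List Int) :
    tcdFind tree_list last idx result l
      = tcdFind tree_list last (idx - 1) (result + 1) l := by
  induction l with
  | nil => simp [tcdFind]; ring
  | cons j rest ih =>
      simp only [tcdFind]
      split
      · ring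
      · exact ih

theorem tcd_main (tree_list : List Int) :
    ∀ (k : Nat) (idx result : Int), (idx + tree_list.length).toNat = k →
      -(tree_list.length : Int) ≤ idx →
      tree_count_distance tree_list idx result
        = tcdFind tree_list ((PySem.List.pyGet? tree_list (-1)).getD 0) idx result
            (PySem.List.pyRange idx (-(tree_list.length : Int) - 1) (-1)) := by
  intro k
  induction k using Nat.strong_induction_on with
  | _ k ih =>
    intro idx result hk hge
    rw [tree_count_distance]
    rw [PySem.List.pyRange_neg_one_cons (by omega)]
    rw [if_neg (by omega)]
    simp only [tcdFind]
    split
    · -- tree_list[idx] < tree_list[-1] : A recurses, B skips this j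
      rename_i hlt
      rw [if_neg (by omega)]
      rw [tcdFind_shift]
      by_cases h1 : -(tree_list.length : Int) ≤ idx - 1
      · exact ih ((idx - 1) + tree_list.length).toNat (by omega) (idx - 1) (result + 1) rfl h1
      · -- idx = -len : A's next call returns immediately, B's remaining range is empty
        rw [tree_count_distance, if_pos (by omega)]
        rw [PySem.List.pyRange_neg_one_eq_nil (by omega)]
        simp only [tcdFind]
        omega
    · -- blocker found: both return result + 1
      rename_i hge'
      rw [if_pos (by omega)]
      omega

-- ===== VERDICT (by name: the statement is the Claim_ definition above) =====
theorem tree_count_distance_spec : Claim_equal_tree_count_distance := by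
  intro tree_list idx result _ _
  unfold Spec_tree_count_distance tree_count_distance_alt
  by_cases h : idx < -(tree_list.length : Int)
  · rw [if_pos h, tree_count_distance, if_pos (by omega)]
  · rw [if_neg h]
    exact tcd_main tree_list (idx + tree_list.length).toNat idx result rfl (by omega)
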